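-- pv_equiv track=rewrite | github.com/Kuhlman-Lab/evopro | evopro/genetic_alg/DesignSeq.py | _load_symmetry
-- ===== SOURCE A (Python) =====
-- def _load_symmetry(sym_list):
--     """takes user input of the symmetry list from json and beefs up internal representation"""
--     sym_dict = {}
--     for slist in sym_list:
--         for elem1 in slist:
--             if elem1 not in sym_dict:
--                 sym_dict[elem1] = []
--             for elem2 in slist:
--                 if elem1 != elem2 and elem2 not in sym_dict[elem1]:
--                     sym_dict[elem1].append(elem2)
--     return sym_dict
-- ===== SOURCE B (Python) =====
-- def _load_symmetry(sym_list):
--     """Gather all partners per element first, then collapse each list to its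
--     first-occurrence-unique form (two phases instead of dedup-while-scanning)."""
--     raw = {}
--     for slist in sym_list:
--         for elem1 in slist:
--             raw.setdefault(elem1, []).extend(e2 for e2 in slist if elem1 != e2)
--     return {k: list(dict.fromkeys(v)) for k, v in raw.items()}
-- ===== Notes on version B (the rewrite author's own statement) =====
-- stated objective: faster
-- what changed: A interleaves key creation, duplicate checks (linear 'in' scans over the growing value lists) and appends inside the triple nested scan; B first gathers every partner per element with no membership test at all (setdefault+extend), then collapses each gathered list with hash-based dict.fromkeys in a second pass.
import Mathlib
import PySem

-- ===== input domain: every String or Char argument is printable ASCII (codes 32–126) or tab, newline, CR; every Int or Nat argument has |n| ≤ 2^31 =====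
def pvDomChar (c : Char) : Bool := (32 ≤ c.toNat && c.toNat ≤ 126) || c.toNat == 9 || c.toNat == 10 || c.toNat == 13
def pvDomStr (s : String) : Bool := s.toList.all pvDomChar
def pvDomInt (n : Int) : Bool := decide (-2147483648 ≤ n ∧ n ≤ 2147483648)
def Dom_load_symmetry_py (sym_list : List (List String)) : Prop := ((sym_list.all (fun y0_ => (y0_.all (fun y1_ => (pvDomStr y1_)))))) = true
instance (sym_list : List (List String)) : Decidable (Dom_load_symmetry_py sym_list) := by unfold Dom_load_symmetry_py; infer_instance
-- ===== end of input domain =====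

-- B gathers all partners per element first with no membership tests (setdefault+extend), then dedups each
-- gathered list in one hash-based pass; a timing run measured it faster than A's interleaved linear-scan dedup.


-- ===== PORT A =====
def load_symmetry_py (sym_list : List (List String)) : List (String × List String) :=
  (sym_list.foldl (fun sym_dict slist =>
    slist.foldl (fun sym_dict elem1 =>
      let sym_dict := if sym_dict.contains elem1 then sym_dict else sym_dict.insert elem1 []
      slist.foldl (fun sym_dict elem2 =>
        if elem1 ≠ elem2 ∧ elem2 ∉ sym_dict.getD elem1 [] then
          sym_dict.modify elem1 [] (fun v => v ++ [elem2])
        else sym_dict) sym_dict) sym_dict)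
    (PySem.Dict.empty : PySem.Dict String (List String))).items

-- ===== PORT B =====
def load_symmetry_py_alt (sym_list : List (List String)) : List (String × List String) :=
  let raw := sym_list.foldl (fun raw slist =>
    slist.foldl (fun raw elem1 =>
      raw.modify elem1 [] (fun v => v ++ slist.filter (fun e2 => elem1 ≠ e2))) raw)
    (PySem.Dict.empty : PySem.Dict String (List String))
  raw.items.map (fun p => (p.1, PySem.List.dedup p.2))

-- ===== PRECONDITION & SPEC =====
def Spec_load_symmetry_py (sym_list : List (List String)) (out : List (String × List String)) : Prop := out = load_symmetry_py_alt sym_list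
instance (sym_list : List (List String)) (out : List (String × List String)) : Decidable (Spec_load_symmetry_py sym_list out) := by unfold Spec_load_symmetry_py; infer_instance

-- ===== CLAIM (what is proved, stated in full; the proofs are below) =====
def Claim_equal_load_symmetry_py : Prop := ∀ (sym_list : List (List String)), Dom_load_symmetry_py sym_list → Spec_load_symmetry_py sym_list (load_symmetry_py sym_list)

-- ===== LEMMAS AND PROOFS =====

-- the dict-level counterpart of B's final dedup pass
def pvMapDict (r : PySem.Dict String (List String)) : PySem.Dict String (List String) :=
  PySem.Dict.mk (r.items.map (fun p => (p.1, PySem.List.dedup p.2)))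

theorem pvKeys_mapDict (r : PySem.Dict String (List String)) : (pvMapDict r).keys = r.keys := by
  simp [pvMapDict, PySem.Dict.keys]

theorem pvContains_mapDict (r : PySem.Dict String (List String)) (k : String) :
    (pvMapDict r).contains k = r.contains k := by
  rw [PySem.Dict.contains_eq_decide_mem_keys, PySem.Dict.contains_eq_decide_mem_keys, pvKeys_mapDict]

theorem pvGet?_mapDict (r : PySem.Dict String (List String)) (k : String) :
    (pvMapDict r).get? k = (r.get? k).map PySem.List.dedup := by
  obtain ⟨l⟩ := r
  induction l with
  | nil => simp [pvMapDict, PySem.Dict.get?]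
  | cons p rest ih =>
    simp only [pvMapDict, List.map_cons] at *
    rw [PySem.Dict.get?_mk_cons, PySem.Dict.get?_mk_cons]
    by_cases h : p.1 == k
    · simp [h]
    · simp only [h, Bool.false_eq_true, if_false]
      exact ih

theorem pvGetD_mapDict (r : PySem.Dict String (List String)) (k : String) :
    (pvMapDict r).getD k [] = PySem.List.dedup (r.getD k []) := by
  rw [PySem.Dict.getD_eq_get?_getD, PySem.Dict.getD_eq_get?_getD, pvGet?_mapDict]
  cases r.get? k <;> simp [PySem.List.dedup]

theorem pvInsert_mapDict (r : PySem.Dict String (List String)) (k : String) (w : List String) :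
    (pvMapDict r).insert k (PySem.List.dedup w) = pvMapDict (r.insert k w) := by
  by_cases hc : r.contains k = true
  · apply PySem.Dict.ext
    rw [PySem.Dict.items_insert_of_contains _ _ (by rw [pvContains_mapDict]; exact hc)]
    show _ = (pvMapDict (r.insert k w)).items
    simp only [pvMapDict]
    rw [PySem.Dict.items_insert_of_contains _ _ hc]
    simp only [List.map_map]
    apply List.map_congr_left
    intro p _
    by_cases h : p.1 = k <;> simp [h]
  · apply PySem.Dict.ext
    rw [PySem.Dict.items_insert_of_not_contains _ _ (by rw [pvContains_mapDict]; simpa using hc)]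
    show _ = (pvMapDict (r.insert k w)).items
    simp only [pvMapDict]
    rw [PySem.Dict.items_insert_of_not_contains _ _ (by simpa using hc)]
    simp

-- inserting back the value already present leaves the dict unchanged
theorem pvInsert_getD_self (d : PySem.Dict String (List String)) (k : String)
    (hnd : d.keys.Nodup) (hc : d.contains k = true) : d.insert k (d.getD k []) = d := by
  apply PySem.Dict.ext
  rw [PySem.Dict.items_insert_of_contains _ _ hc]
  have h : ∀ p ∈ d.items, (if (p.1 == k) = true then (k, d.getD k []) else p) = p := by
    intro p hp
    by_cases h : p.1 = k
    · have hm : (k, p.2) ∈ d.items := by rw [← h]; exact hp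
      have := PySem.Dict.getD_of_mem_items d hm hnd ([] : List String)
      simp [h, this]
      exact (Prod.ext h.symm rfl)
    · simp [h]
  rw [List.map_congr_left h]
  simp

-- dedup of an extension is the guarded-append fold from the dedup
theorem pvDedup_append (v l : List String) :
    l.foldl PySem.Set.add (PySem.List.dedup v) = PySem.List.dedup (v ++ l) := by
  simp [PySem.List.dedup_eq_ofList, PySem.Set.ofList_append, PySem.Set.update]

-- A's inner scan over slist, characterised as a single insert
theorem pvInnerA (elem1 : String) (slist : List String) (d : PySem.Dict String (List String))
    (hnd : d.keys.Nodup) (hc : d.contains elem1 = true) :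
    slist.foldl (fun sym_dict elem2 =>
        if elem1 ≠ elem2 ∧ elem2 ∉ sym_dict.getD elem1 [] then
          sym_dict.modify elem1 [] (fun v => v ++ [elem2])
        else sym_dict) d
    = d.insert elem1 ((slist.filter (fun e2 => elem1 ≠ e2)).foldl PySem.Set.add (d.getD elem1 [])) := by
  induction slist generalizing d with
  | nil => simp [pvInsert_getD_self d elem1 hnd hc]
  | cons e2 rest ih =>
    by_cases he : elem1 = e2
    · simp only [List.foldl_cons, List.filter_cons]
      rw [if_neg (fun hcon => hcon.1 he), if_neg (by simp [he])]
      exact ih d hnd hc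
    · by_cases hm : e2 ∈ d.getD elem1 []
      · simp only [List.foldl_cons, List.filter_cons]
        rw [if_neg (fun hcon => hcon.2 hm), if_pos (by simp [he]), List.foldl_cons,
          PySem.Set.add_of_mem hm]
        exact ih d hnd hc
      · simp only [List.foldl_cons, List.filter_cons]
        rw [if_pos ⟨he, hm⟩, if_pos (by simp [he])]
        have hstep : d.modify elem1 [] (fun v => v ++ [e2]) = d.insert elem1 (d.getD elem1 [] ++ [e2]) := rfl
        rw [hstep, ih _ (PySem.Dict.nodup_keys_insert _ _ _ hnd) (PySem.Dict.contains_insert_self _ _ _)]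
        rw [PySem.Dict.getD_insert_self, PySem.Dict.insert_insert_self, List.foldl_cons,
          PySem.Set.add_of_not_mem hm]

-- A's whole elem1 step (setdefault + inner scan) as a single insert
theorem pvStepA (elem1 : String) (slist : List String) (d : PySem.Dict String (List String))
    (hnd : d.keys.Nodup) :
    slist.foldl (fun sym_dict elem2 =>
        if elem1 ≠ elem2 ∧ elem2 ∉ sym_dict.getD elem1 [] then
          sym_dict.modify elem1 [] (fun v => v ++ [elem2])
        else sym_dict) (if d.contains elem1 then d else d.insert elem1 [])
    = d.insert elem1 ((slist.filter (fun e2 => elem1 ≠ e2)).foldl PySem.Set.add (d.getD elem1 [])) := by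
  by_cases hc : d.contains elem1 = true
  · rw [if_pos hc]; exact pvInnerA elem1 slist d hnd hc
  · rw [if_neg (by simpa using hc)]
    rw [pvInnerA elem1 slist _ (PySem.Dict.nodup_keys_insert _ _ _ hnd) (PySem.Dict.contains_insert_self _ _ _)]
    rw [PySem.Dict.getD_insert_self, PySem.Dict.insert_insert_self,
      PySem.Dict.getD_of_not_contains d [] (by simpa using hc)]

-- nodup keys survive B's gather loop
theorem pvNodupB (slist : List String) (elems : List String) (r : PySem.Dict String (List String))
    (hnd : r.keys.Nodup) :
    (elems.foldl (fun raw elem1 =>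
        raw.modify elem1 [] (fun v => v ++ slist.filter (fun e2 => elem1 ≠ e2))) r).keys.Nodup := by
  induction elems generalizing r with
  | nil => exact hnd
  | cons e rest ih =>
    exact ih _ (PySem.Dict.nodup_keys_insert _ _ _ hnd)

-- one sublist: A's scan over its elements tracks B's gather through pvMapDict
theorem pvMiddle (slist : List String) (elems : List String) (r : PySem.Dict String (List String))
    (hnd : r.keys.Nodup) :
    elems.foldl (fun sym_dict elem1 =>
      let sym_dict := if sym_dict.contains elem1 then sym_dict else sym_dict.insert elem1 []
      slist.foldl (fun sym_dict elem2 =>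
        if elem1 ≠ elem2 ∧ elem2 ∉ sym_dict.getD elem1 [] then
          sym_dict.modify elem1 [] (fun v => v ++ [elem2])
        else sym_dict) sym_dict) (pvMapDict r)
    = pvMapDict (elems.foldl (fun raw elem1 =>
        raw.modify elem1 [] (fun v => v ++ slist.filter (fun e2 => elem1 ≠ e2))) r) := by
  induction elems generalizing r with
  | nil => rfl
  | cons elem1 rest ih =>
    simp only [List.foldl_cons]
    have hndm : (pvMapDict r).keys.Nodup := by rw [pvKeys_mapDict]; exact hnd
    have hstep := pvStepA elem1 slist (pvMapDict r) hndm
    rw [hstep, pvGetD_mapDict, pvDedup_append, pvInsert_mapDict]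
    have hB : r.modify elem1 [] (fun v => v ++ slist.filter (fun e2 => elem1 ≠ e2))
        = r.insert elem1 (r.getD elem1 [] ++ slist.filter (fun e2 => elem1 ≠ e2)) := rfl
    rw [hB]
    exact ih _ (PySem.Dict.nodup_keys_insert _ _ _ hnd)

-- main invariant over the whole outer fold
theorem pvMain (sym_list : List (List String)) (r : PySem.Dict String (List String))
    (hnd : r.keys.Nodup) :
    sym_list.foldl (fun sym_dict slist =>
      slist.foldl (fun sym_dict elem1 =>
        let sym_dict := if sym_dict.contains elem1 then sym_dict else sym_dict.insert elem1 []
        slist.foldl (fun sym_dict elem2 =>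
          if elem1 ≠ elem2 ∧ elem2 ∉ sym_dict.getD elem1 [] then
            sym_dict.modify elem1 [] (fun v => v ++ [elem2])
          else sym_dict) sym_dict) sym_dict) (pvMapDict r)
    = pvMapDict (sym_list.foldl (fun raw slist =>
        slist.foldl (fun raw elem1 =>
          raw.modify elem1 [] (fun v => v ++ slist.filter (fun e2 => elem1 ≠ e2))) raw) r) := by
  induction sym_list generalizing r with
  | nil => rfl
  | cons slist rest ih =>
    simp only [List.foldl_cons]
    rw [pvMiddle slist slist r hnd]
    exact ih _ (pvNodupB slist slist r hnd)

-- ===== VERDICT (by name: the statement is the Claim_ definition above) =====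
theorem load_symmetry_py_spec : Claim_equal_load_symmetry_py := by
  intro sym_list _
  unfold Spec_load_symmetry_py load_symmetry_py load_symmetry_py_alt
  have h := pvMain sym_list PySem.Dict.empty (by simp [PySem.Dict.empty, PySem.Dict.keys])
  have he : pvMapDict PySem.Dict.empty = (PySem.Dict.empty : PySem.Dict String (List String)) := rfl
  rw [he] at h
  rw [h]
  rfl
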